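-- pv_equiv track=rewrite | github.com/Mayankjha997/Striver_sheet_solution | stack and queue/next_greater_element_3.py | next_greater_element_3
-- ===== SOURCE A (Python) =====
-- def next_greater_element_3(n):
--     nums = list(map(int,str(n)))
--
--     index = len(nums) - 2
--     while index >= 0 and nums[index] >= nums[index+1]:
--         index -= 1
--     if index == -1:
--         return -1
--
--     index2 = len(nums) - 1
--     while nums[index2] <= nums[index]:
--         index2-=1
--
--     nums[index],nums[index2] = nums[index2],nums[index]
--     nums[index+1:] = reversed(nums[index+1:])
--
--     result = ""
--     for n in nums:
--         result += str(n)
--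
--     if int(result) < 2**31:
--         return int(result)
--     else:
--         return -1
-- ===== SOURCE B (Python) =====
-- def next_greater_element_3(n):
--     ds = [int(c) for c in str(n)]
--     rises = [i for i in range(1, len(ds)) if ds[i - 1] < ds[i]]
--     if not rises:
--         return -1
--     k = rises[-1]
--     pivot = ds[k - 1]
--     tail = sorted(ds[k:])
--     succ = min(d for d in tail if d > pivot)
--     tail.remove(succ)
--     out_digits = ds[:k - 1] + [succ] + sorted(tail + [pivot])
--     val = int(''.join(map(str, out_digits)))
--     return val if val < 2 ** 31 else -1
-- ===== Notes on version B (the rewrite author's own statement) =====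
-- stated objective: alternative
-- what changed: B replaces A's backward pivot scan, rightmost-successor scan, in-place swap and suffix reversal by a forward comprehension collecting all ascent positions (taking the last), a min-over-filter to pick the successor digit, and two sorted() calls that rebuild the new suffix as a sorted multiset.
import Mathlib
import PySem

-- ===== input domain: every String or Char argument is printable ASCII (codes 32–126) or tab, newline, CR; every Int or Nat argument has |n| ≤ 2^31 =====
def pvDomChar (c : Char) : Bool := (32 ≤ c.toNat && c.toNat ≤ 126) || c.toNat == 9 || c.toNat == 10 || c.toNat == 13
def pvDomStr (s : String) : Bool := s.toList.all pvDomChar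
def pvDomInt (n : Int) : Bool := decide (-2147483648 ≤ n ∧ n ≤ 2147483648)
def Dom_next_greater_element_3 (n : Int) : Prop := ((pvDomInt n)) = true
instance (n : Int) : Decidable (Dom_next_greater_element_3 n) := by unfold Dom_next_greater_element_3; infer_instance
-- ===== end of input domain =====

-- B rebuilds the answer from the last ascent position with min-over-filter and sorted() instead of
-- A's backward scans, swap and suffix reversal; objective: alternative (same asymptotic cost).

-- ===== PORT A =====
-- list(map(int, str(n))): per-character int(c); exact on Pre_ (n ≥ 0), where every char is a digit
def pvDigitsOf (n : Int) : List Int :=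
  (PySem.Int.toChars n).map (fun c => ((c.toNat : Int) - 48))

-- 'index = len-2; while index >= 0 and nums[index] >= nums[index+1]: index -= 1' — argument is index+1
def pvAPivot (nums : List Int) : Nat → Int
  | 0 => -1
  | k + 1 =>
    if PySem.List.pyGetD nums ((k : Int) + 1) 0 ≤ PySem.List.pyGetD nums (k : Int) 0 then
      pvAPivot nums k
    else (k : Int)

-- 'index2 = len-1; while nums[index2] <= nums[index]: index2 -= 1' — argument is the current index2;
-- the Python loop never walks past 0 on inputs it returns on, so the 0 case is never the answer used
def pvASecond (nums : List Int) (pv : Int) : Nat → Nat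
  | 0 => 0
  | j + 1 =>
    if PySem.List.pyGetD nums ((j : Int) + 1) 0 ≤ pv then pvASecond nums pv j
    else j + 1

def next_greater_element_3 (n : Int) : Int :=
  let nums := pvDigitsOf n
  let index := pvAPivot nums (nums.length - 1)
  if index = -1 then -1
  else
    let pv := PySem.List.pyGetD nums index 0
    let i2 := pvASecond nums pv (nums.length - 1)
    let v2 := PySem.List.pyGetD nums (i2 : Int) 0
    -- simultaneous swap nums[index], nums[index2] (index ≠ index2 whenever the loop exits here)
    let nums1 := (nums.set index.toNat v2).set i2 pv
    -- nums[index+1:] = reversed(nums[index+1:])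
    let nums2 := nums1.take (index.toNat + 1) ++ (nums1.drop (index.toNat + 1)).reverse
    -- result = ""; for d in nums: result += str(d)
    let result := nums2.foldl (fun s d => s ++ PySem.Int.toStr d) ""
    -- int(result): result is a nonempty digit string, so int() always succeeds
    let r := (PySem.Int.ofStr? result).getD 0
    if r < 2 ^ 31 then r else -1

-- ===== PORT B =====
def next_greater_element_3_alt (n : Int) : Int :=
  let ds := pvDigitsOf n
  let rises := (PySem.List.pyRange 1 (ds.length : Int) 1).filter
    (fun i => decide (PySem.List.pyGetD ds (i - 1) 0 < PySem.List.pyGetD ds i 0))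
  if rises = [] then -1
  else
    let k := PySem.List.pyGetD rises (-1) 0
    let pivot := PySem.List.pyGetD ds (k - 1) 0
    let tail := PySem.List.sorted (PySem.List.slice ds (some k) none) (fun x => x) false
    -- min(d for d in tail if d > pivot): the generator is nonempty whenever rises ≠ []
    let succ := (PySem.List.min? (tail.filter (fun d => decide (pivot < d))) (fun x => x)).getD 0
    -- tail.remove(succ): succ ∈ tail here, so remove? always returns some
    let tail1 := (PySem.List.remove? tail succ).getD tail
    let outd := PySem.List.slice ds none (some (k - 1)) ++ [succ] ++
      PySem.List.sorted (tail1 ++ [pivot]) (fun x => x) false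
    let val := (PySem.Int.ofStr? (PySem.Str.join "" (outd.map PySem.Int.toStr))).getD 0
    if val < 2 ^ 31 then val else -1

-- ===== PRECONDITION & SPEC =====
-- Pre_ excludes exactly the negative n, on which A raises ValueError (int('-') while mapping str(n))
def Pre_next_greater_element_3 (n : Int) : Prop := 0 ≤ n
instance (n : Int) : Decidable (Pre_next_greater_element_3 n) := by
  unfold Pre_next_greater_element_3; infer_instance
def pvWitness_next_greater_element_3 : Int := 1234

def Spec_next_greater_element_3 (n : Int) (out : Int) : Prop := out = next_greater_element_3_alt n
instance (n : Int) (out : Int) : Decidable (Spec_next_greater_element_3 n out) := by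
  unfold Spec_next_greater_element_3; infer_instance

-- ===== CLAIM (what is proved, stated in full; the proofs are below) =====
def Claim_equal_next_greater_element_3 : Prop :=
  ∀ (n : Int), Dom_next_greater_element_3 n → Pre_next_greater_element_3 n →
    Spec_next_greater_element_3 n (next_greater_element_3 n)

-- ===== LEMMAS AND PROOFS =====

-- proof-side copies of the two bodies after the shared digit extraction
def pvRises (ds : List Int) : List Int :=
  (PySem.List.pyRange 1 (ds.length : Int) 1).filter
    (fun i => decide (PySem.List.pyGetD ds (i - 1) 0 < PySem.List.pyGetD ds i 0))

def pvAOut (nums : List Int) : Int :=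
  let index := pvAPivot nums (nums.length - 1)
  if index = -1 then -1
  else
    let pv := PySem.List.pyGetD nums index 0
    let i2 := pvASecond nums pv (nums.length - 1)
    let v2 := PySem.List.pyGetD nums (i2 : Int) 0
    let nums1 := (nums.set index.toNat v2).set i2 pv
    let nums2 := nums1.take (index.toNat + 1) ++ (nums1.drop (index.toNat + 1)).reverse
    let result := nums2.foldl (fun s d => s ++ PySem.Int.toStr d) ""
    let r := (PySem.Int.ofStr? result).getD 0
    if r < 2 ^ 31 then r else -1

def pvBOut (ds : List Int) : Int :=
  let rises := pvRises ds
  if rises = [] then -1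
  else
    let k := PySem.List.pyGetD rises (-1) 0
    let pivot := PySem.List.pyGetD ds (k - 1) 0
    let tail := PySem.List.sorted (PySem.List.slice ds (some k) none) (fun x => x) false
    let succ := (PySem.List.min? (tail.filter (fun d => decide (pivot < d))) (fun x => x)).getD 0
    let tail1 := (PySem.List.remove? tail succ).getD tail
    let outd := PySem.List.slice ds none (some (k - 1)) ++ [succ] ++
      PySem.List.sorted (tail1 ++ [pivot]) (fun x => x) false
    let val := (PySem.Int.ofStr? (PySem.Str.join "" (outd.map PySem.Int.toStr))).getD 0
    if val < 2 ^ 31 then val else -1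

theorem pvA_eq (n : Int) : next_greater_element_3 n = pvAOut (pvDigitsOf n) := rfl

theorem pvB_eq (n : Int) : next_greater_element_3_alt n = pvBOut (pvDigitsOf n) := rfl

theorem pv_pyGetD_nonneg {α : Type} (xs : List α) (i : Int) (d : α) (h : 0 ≤ i) :
    PySem.List.pyGetD xs i d = xs.getD i.toNat d := by
  rw [← Int.toNat_of_nonneg h, PySem.List.pyGetD_natCast, Int.toNat_natCast]

theorem pvAPivot_succ (nums : List Int) (k : Nat) :
    pvAPivot nums (k + 1) =
      if nums.getD (k + 1) 0 ≤ nums.getD k 0 then pvAPivot nums k else (k : Int) := by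
  have h1 : ((k : Int) + 1) = ((k + 1 : Nat) : Int) := by push_cast; ring
  show (if PySem.List.pyGetD nums ((k : Int) + 1) 0 ≤ PySem.List.pyGetD nums (k : Int) 0
    then pvAPivot nums k else (k : Int)) = _
  rw [h1, PySem.List.pyGetD_natCast, PySem.List.pyGetD_natCast]

theorem pvASecond_succ (nums : List Int) (pv : Int) (j : Nat) :
    pvASecond nums pv (j + 1) =
      if nums.getD (j + 1) 0 ≤ pv then pvASecond nums pv j else j + 1 := by
  have h1 : ((j : Int) + 1) = ((j + 1 : Nat) : Int) := by push_cast; ring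
  show (if PySem.List.pyGetD nums ((j : Int) + 1) 0 ≤ pv then pvASecond nums pv j else j + 1) = _
  rw [h1, PySem.List.pyGetD_natCast]

theorem pv_pivot_none (nums : List Int) (m : Nat)
    (h : ∀ k, k < m → nums.getD (k + 1) 0 ≤ nums.getD k 0) : pvAPivot nums m = -1 := by
  induction m with
  | zero => rfl
  | succ k ih =>
    rw [pvAPivot_succ, if_pos (h k (Nat.lt_succ_self k))]
    exact ih (fun j hj => h j (Nat.lt_succ_of_lt hj))

theorem pv_pivot_found (nums : List Int) (m k : Nat) (hk : k < m)
    (hr : ¬ nums.getD (k + 1) 0 ≤ nums.getD k 0)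
    (hmax : ∀ j, k < j → j < m → nums.getD (j + 1) 0 ≤ nums.getD j 0) :
    pvAPivot nums m = (k : Int) := by
  induction m with
  | zero => omega
  | succ m ih =>
    rw [pvAPivot_succ]
    rcases Nat.lt_or_ge k m with hkm | hkm
    · rw [if_pos (hmax m hkm (Nat.lt_succ_self m))]
      exact ih hkm (fun j hj hjm => hmax j hj (Nat.lt_succ_of_lt hjm))
    · have : k = m := by omega
      subst this
      rw [if_neg hr]

theorem pv_second_found (nums : List Int) (pv : Int) (m i2 : Nat) (h1 : 1 ≤ i2) (h2 : i2 ≤ m)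
    (h3 : ¬ nums.getD i2 0 ≤ pv) (h4 : ∀ j, i2 < j → j ≤ m → nums.getD j 0 ≤ pv) :
    pvASecond nums pv m = i2 := by
  induction m with
  | zero => omega
  | succ m ih =>
    rw [pvASecond_succ]
    rcases Nat.lt_or_ge i2 (m + 1) with him | him
    · rw [if_pos (h4 (m + 1) him (Nat.le_refl _))]
      exact ih (by omega) (fun j hj hjm => h4 j hj (Nat.le_succ_of_le hjm))
    · have : i2 = m + 1 := by omega
      subst this
      rw [if_neg h3]

theorem pv_mem_rises (ds : List Int) (i : Int) :
    i ∈ pvRises ds ↔ 1 ≤ i ∧ i < ds.length ∧ ds.getD (i.toNat - 1) 0 < ds.getD i.toNat 0 := by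
  unfold pvRises
  rw [List.mem_filter]
  simp only [PySem.List.mem_pyRange_one, decide_eq_true_eq]
  constructor
  · rintro ⟨⟨h1, h2⟩, h3⟩
    refine ⟨h1, h2, ?_⟩
    rwa [pv_pyGetD_nonneg ds (i - 1) 0 (by omega), pv_pyGetD_nonneg ds i 0 (by omega),
      show (i - 1).toNat = i.toNat - 1 by omega] at h3
  · rintro ⟨h1, h2, h3⟩
    refine ⟨⟨h1, h2⟩, ?_⟩
    rwa [pv_pyGetD_nonneg ds (i - 1) 0 (by omega), pv_pyGetD_nonneg ds i 0 (by omega),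
      show (i - 1).toNat = i.toNat - 1 by omega]

theorem pv_rises_pairwise (ds : List Int) : (pvRises ds).Pairwise (· < ·) :=
  (PySem.List.pairwise_lt_pyRange_one 1 (ds.length : Int)).filter _

theorem pv_le_getLast {α : Type} [Preorder α] {l : List α} (hp : l.Pairwise (· < ·))
    {x : α} (hx : x ∈ l) (hne : l ≠ []) : x ≤ l.getLast hne := by
  induction l with
  | nil => exact absurd hx (List.not_mem_nil)
  | cons a t ih =>
    rcases t with _ | ⟨b, t'⟩
    · simp only [List.mem_singleton] at hx
      subst hx; exact le_refl _
    · rw [List.getLast_cons (by simp)]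
      rcases List.mem_cons.mp hx with rfl | hx'
      · exact le_of_lt (List.rel_of_pairwise_cons hp (List.getLast_mem _))
      · exact ih (List.pairwise_cons.mp hp).2 hx' (by simp)

theorem pv_getLast_le {l : List Int} (hp : l.Pairwise (fun a b => b ≤ a))
    {x : Int} (hx : x ∈ l) (hne : l ≠ []) : l.getLast hne ≤ x := by
  induction l with
  | nil => exact absurd hx (List.not_mem_nil)
  | cons a t ih =>
    rcases t with _ | ⟨b, t'⟩
    · simp only [List.mem_singleton] at hx
      subst hx; exact le_refl _
    · rw [List.getLast_cons (by simp)]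
      rcases List.mem_cons.mp hx with rfl | hx'
      · exact List.rel_of_pairwise_cons hp (List.getLast_mem _)
      · exact ih (List.pairwise_cons.mp hp).2 hx' (by simp)

theorem pv_join_eq_foldl (l : List Int) :
    PySem.Str.join "" (l.map PySem.Int.toStr) =
      l.foldl (fun s d => s ++ PySem.Int.toStr d) "" := by
  apply String.toList_inj.mp
  rw [PySem.Str.toList_join]
  have hfold : ∀ (l : List Int) (acc : String),
      (l.foldl (fun s d => s ++ PySem.Int.toStr d) acc).toList =
        acc.toList ++ (l.map PySem.Int.toChars).flatten := by
    intro l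
    induction l with
    | nil => intro acc; simp
    | cons a t ih =>
      intro acc
      simp only [List.foldl_cons, List.map_cons, List.flatten_cons, ih,
        String.toList_append, PySem.Int.toList_toStr, List.append_assoc]
  rw [hfold]
  have hjoin : ∀ css : List (List Char), PySem.Chars.join [] css = css.flatten := by
    intro css
    induction css with
    | nil => simp [PySem.Chars.join_nil]
    | cons p rest ih =>
      rcases rest with _ | ⟨q, rest'⟩
      · simp [PySem.Chars.join_singleton]
      · rw [PySem.Chars.join_cons_cons]
        simp only [List.flatten_cons] at ih ⊢
        rw [ih]
        simp
  have : ("" : String).toList = ([] : List Char) := rfl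
  rw [this, hjoin]
  simp only [List.map_map]
  have : (String.toList ∘ PySem.Int.toStr) = PySem.Int.toChars := by
    funext n; exact PySem.Int.toList_toStr n
  rw [this]
  simp

theorem pv_main_none (ds : List Int) (hr : pvRises ds = []) : pvAOut ds = pvBOut ds := by
  have hA : pvAPivot ds (ds.length - 1) = -1 := by
    apply pv_pivot_none
    intro k hk
    by_contra hlt
    push Not at hlt
    have hmem : ((k + 1 : Nat) : Int) ∈ pvRises ds := by
      rw [pv_mem_rises]
      refine ⟨by exact_mod_cast Nat.one_le_iff_ne_zero.mpr (by omega), by exact_mod_cast (by omega : k + 1 < ds.length), ?_⟩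
      simpa using hlt
    rw [hr] at hmem
    exact absurd hmem (List.not_mem_nil)
  simp [pvAOut, pvBOut, hA, hr]

theorem pv_main_some (ds : List Int) (hr : pvRises ds ≠ []) : pvAOut ds = pvBOut ds := by
  have hL0 : 0 < ds.length := by
    rcases Nat.eq_zero_or_pos ds.length with h0 | h; swap; · exact h
    exfalso
    apply hr
    have : ∀ i : Int, i ∉ pvRises ds := by
      intro i hmem
      obtain ⟨h1, h2, _⟩ := (pv_mem_rises ds i).mp hmem
      omega
    exact List.eq_nil_iff_forall_not_mem.mpr this
  set L := ds.length with hLdef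
  set kB := (pvRises ds).getLast hr with hkBdef
  have hKmem : kB ∈ pvRises ds := List.getLast_mem hr
  obtain ⟨hk1, hkL, hkrise⟩ := (pv_mem_rises ds kB).mp hKmem
  set K := kB.toNat with hKdef
  have hK1 : 1 ≤ K := by omega
  have hKL : K < L := by omega
  have hkBK : kB = (K : Int) := by omega
  have hmax : ∀ j : Nat, K ≤ j → j + 1 < L → ds.getD (j + 1) 0 ≤ ds.getD j 0 := by
    intro j hj hjL
    by_contra hlt
    push Not at hlt
    have hmem : ((j + 1 : Nat) : Int) ∈ pvRises ds := by
      rw [pv_mem_rises]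
      refine ⟨by exact_mod_cast Nat.one_le_iff_ne_zero.mpr (by omega), by exact_mod_cast (by omega : j + 1 < ds.length), ?_⟩
      simpa using hlt
    have hle := pv_le_getLast (pv_rises_pairwise ds) hmem hr
    rw [← hkBdef, hkBK] at hle
    have : j + 1 ≤ K := by exact_mod_cast hle
    omega
  set pivot := ds.getD (K - 1) 0 with hpivotdef
  set suf := ds.drop K with hsufdef
  have hsuflen : suf.length = L - K := by simp [hsufdef, hLdef]
  have hget : ∀ a : Nat, a < suf.length → suf.getD a 0 = ds.getD (K + a) 0 := by
    intro a ha
    rw [List.getD_eq_getElem _ _ ha, List.getD_eq_getElem _ _ (by omega)]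
    exact List.getElem_drop
  have hmono : ∀ (d a : Nat), a + d < suf.length → suf.getD (a + d) 0 ≤ suf.getD a 0 := by
    intro d
    induction d with
    | zero => intro a _; exact le_refl _
    | succ d ih =>
      intro a ha
      have h1 : suf.getD (a + d + 1) 0 ≤ suf.getD (a + d) 0 := by
        rw [hget _ (by omega), hget _ (by omega)]
        have e : K + (a + d + 1) = (K + (a + d)) + 1 := by omega
        rw [e]
        exact hmax (K + (a + d)) (by omega) (by omega)
      have e2 : a + (d + 1) = a + d + 1 := rfl
      rw [e2]
      exact h1.trans (ih a (by omega))
  have hsuf_pair : suf.Pairwise (fun a b => b ≤ a) := by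
    rw [List.pairwise_iff_getElem]
    intro i j hi hj hij
    have h := hmono (j - i) i (by omega)
    have e : i + (j - i) = j := by omega
    rw [e] at h
    rw [List.getD_eq_getElem _ _ hj, List.getD_eq_getElem _ _ hi] at h
    exact h
  have hpK : pivot < ds.getD K 0 := hkrise
  set p : Int → Bool := fun d => decide (pivot < d) with hpdef
  set t := suf.takeWhile p with htdef
  set r := suf.dropWhile p with hrdef
  have htr : t ++ r = suf := List.takeWhile_append_dropWhile
  have hsufne : suf ≠ [] := by
    apply List.ne_nil_of_length_pos; omega
  have htne : t ≠ [] := by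
    obtain ⟨x, s', hxs⟩ := List.exists_cons_of_ne_nil hsufne
    have hx0 : x = ds.getD K 0 := by
      have h := hget 0 (by omega)
      rw [hxs] at h
      simpa using h
    rw [htdef, hxs, List.takeWhile_cons_of_pos
      (by rw [hpdef]; simp only [decide_eq_true_eq]; rw [hx0]; exact hpK)]
    simp
  set v2 := t.getLast htne with hv2def
  have hv2t : v2 ∈ t := List.getLast_mem htne
  have ht_gt : ∀ y ∈ t, pivot < y := by
    intro y hy
    have := List.mem_takeWhile_imp hy
    simpa [hpdef] using this
  have ht_pair : t.Pairwise (fun a b => b ≤ a) :=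
    hsuf_pair.sublist (List.takeWhile_prefix p).sublist
  have hr_pair : r.Pairwise (fun a b => b ≤ a) :=
    hsuf_pair.sublist (List.dropWhile_suffix p).sublist
  have hr_le : ∀ y ∈ r, y ≤ pivot := by
    cases hrc : r with
    | nil => simp
    | cons hd tl =>
      intro y hy
      have hhd : hd ≤ pivot := by
        have h := List.head?_dropWhile_not p suf
        rw [← hrdef, hrc] at h
        simp only [List.head?_cons] at h
        simpa [hpdef] using h
      rcases List.mem_cons.mp hy with rfl | hy'
      · exact hhd
      · have hp' : List.Pairwise (fun a b : Int => b ≤ a) (hd :: tl) := hrc ▸ hr_pair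
        have h2 := List.rel_of_pairwise_cons hp' hy'
        exact h2.trans hhd
  have htlen_le : t.length ≤ suf.length := by
    rw [← htr]; simp
  have htlen1 : 1 ≤ t.length := List.length_pos_iff.mpr htne
  set i2 := K + (t.length - 1) with hi2def
  have hi2L : i2 < L := by omega
  have hv2idx : ds.getD i2 0 = v2 := by
    rw [← hget (t.length - 1) (by omega), ← htr,
      List.getD_eq_getElem _ _ (by rw [htr]; omega),
      List.getElem_append_left (by omega), hv2def, List.getLast_eq_getElem]
  have hpivA : pvAPivot ds (L - 1) = ((K - 1 : Nat) : Int) := by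
    apply pv_pivot_found ds (L - 1) (K - 1) (by omega)
    · have e : K - 1 + 1 = K := by omega
      rw [e]
      exact not_le.mpr hkrise
    · intro j hj hjm
      exact hmax j (by omega) (by omega)
  have hsecA : pvASecond ds pivot (L - 1) = i2 := by
    apply pv_second_found ds pivot (L - 1) i2 (by omega) (by omega)
    · rw [hv2idx]
      exact not_le.mpr (ht_gt v2 hv2t)
    · intro j hj hjm
      have haL : j - K < suf.length := by omega
      have e : K + (j - K) = j := by omega
      rw [← e, ← hget (j - K) haL]
      have hmem : suf.getD (j - K) 0 ∈ r := by
        rw [← htr, List.getD_eq_getElem _ _ (by rw [htr]; exact haL),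
          List.getElem_append_right (by omega)]
        exact List.getElem_mem _
      exact hr_le _ hmem
  -- the rearranged suffix, shared by both sides
  set ys := r.reverse ++ pivot :: t.dropLast.reverse with hysdef
  -- A's final digit list
  have hAlist :
      (((ds.set (K - 1) v2).set i2 pivot).take ((K - 1) + 1) ++
        (((ds.set (K - 1) v2).set i2 pivot).drop ((K - 1) + 1)).reverse) =
      ds.take (K - 1) ++ [v2] ++ ys := by
    have eK : (K - 1) + 1 = K := by omega
    rw [eK]
    have htake : ((ds.set (K - 1) v2).set i2 pivot).take K = ds.take (K - 1) ++ [v2] := by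
      rw [List.take_set, List.set_eq_of_length_le (by simp; omega)]
      rw [List.take_set]
      have : ds.take K = ds.take (K - 1) ++ [ds.getD (K - 1) 0] := by
        have eK2 : K = (K - 1) + 1 := by omega
        rw [eK2, List.take_add_one, List.getD_eq_getElem _ _ (by omega),
          List.getElem?_eq_getElem (by omega)]
        rfl
      rw [this, List.set_append]
      simp only [List.length_take]
      rw [if_neg (by omega)]
      congr 1
      have : K - 1 - min (K - 1) L = 0 := by omega
      rw [this]
      rfl
    have hdrop : ((ds.set (K - 1) v2).set i2 pivot).drop K = t.dropLast ++ pivot :: r := by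
      rw [List.drop_set, if_neg (by omega), List.drop_set, if_pos (by omega), ← hsufdef]
      have e1 : i2 - K = t.length - 1 := by omega
      rw [e1, ← htr, List.set_append, if_pos (by omega)]
      have e2 : t.set (t.length - 1) pivot = t.dropLast ++ [pivot] := by
        obtain ⟨dl, hdl⟩ : ∃ dl, t = dl ++ [v2] :=
          ⟨t.dropLast, (List.dropLast_append_getLast htne).symm⟩
        rw [hdl]
        simp
      rw [e2, List.append_assoc]
      rfl
    rw [htake, hdrop]
    simp [hysdef, List.reverse_append, List.append_assoc]
  -- B's sorted rebuild equals ys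
  have hperm_suf : suf.Perm (v2 :: (t.dropLast ++ r)) := by
    conv_lhs => rw [← htr, ← List.dropLast_append_getLast htne, ← hv2def]
    rw [List.append_assoc, List.singleton_append]
    exact List.perm_middle
  have hv2tail : v2 ∈ PySem.List.sorted suf (fun x => x) false := by
    rw [PySem.List.mem_sorted]
    exact htr ▸ List.mem_append_left r hv2t
  have htail1 : ((PySem.List.sorted suf (fun x => x) false).erase v2).Perm (t.dropLast ++ r) := by
    have h1 : (PySem.List.sorted suf (fun x => x) false).Perm (v2 :: (t.dropLast ++ r)) :=
      (PySem.List.sorted_perm suf _ false).trans hperm_suf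
    have h2 := h1.erase v2
    rwa [List.erase_cons_head] at h2
  have hys_perm : ys.Perm ((PySem.List.sorted suf (fun x => x) false).erase v2 ++ [pivot]) := by
    have h1 : ys.Perm (pivot :: (r.reverse ++ t.dropLast.reverse)) := List.perm_middle
    have h2 : (r.reverse ++ t.dropLast.reverse).Perm (t.dropLast ++ r) :=
      ((r.reverse_perm).append (t.dropLast.reverse_perm)).trans (List.perm_append_comm)
    have h3 : ((PySem.List.sorted suf (fun x => x) false).erase v2 ++ [pivot]).Perm
        (pivot :: ((PySem.List.sorted suf (fun x => x) false).erase v2)) :=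
      List.perm_append_singleton _ _
    exact ((h1.trans (h2.cons pivot)).trans ((htail1.symm).cons pivot)).trans h3.symm
  have hys_pair : ys.Pairwise (fun a b : Int => a ≤ b) := by
    rw [hysdef, List.pairwise_append]
    refine ⟨List.pairwise_reverse.mpr hr_pair, ?_, ?_⟩
    · rw [List.pairwise_cons]
      refine ⟨?_, List.pairwise_reverse.mpr (ht_pair.sublist (List.dropLast_sublist t))⟩
      intro y hy
      exact le_of_lt (ht_gt y ((List.dropLast_sublist t).mem (List.mem_reverse.mp hy)))
    · intro a ha b hb
      have ha' : a ≤ pivot := hr_le a (List.mem_reverse.mp ha)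
      rcases List.mem_cons.mp hb with rfl | hb'
      · exact ha'
      · exact ha'.trans (le_of_lt (ht_gt b ((List.dropLast_sublist t).mem (List.mem_reverse.mp hb'))))
  have hsorted_ys : PySem.List.sorted
      ((PySem.List.sorted suf (fun x => x) false).erase v2 ++ [pivot]) (fun x => x) false = ys :=
    PySem.List.sorted_id_eq_of_perm_of_pairwise _ _ hys_perm hys_pair
  -- evaluate both sides to the same expression
  have hminv2 : PySem.List.min?
      ((PySem.List.sorted suf (fun x => x) false).filter (fun d => decide (pivot < d)))
      (fun x => x) = some v2 := by
    have hv2F : v2 ∈ (PySem.List.sorted suf (fun x => x) false).filter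
        (fun d => decide (pivot < d)) :=
      List.mem_filter.mpr ⟨hv2tail, by simp only [decide_eq_true_eq]; exact ht_gt v2 hv2t⟩
    cases h : PySem.List.min?
        ((PySem.List.sorted suf (fun x => x) false).filter (fun d => decide (pivot < d)))
        (fun x => x) with
    | none =>
      exfalso
      have := (PySem.List.min?_eq_none_iff _ _).mp h
      rw [this] at hv2F
      exact absurd hv2F (List.not_mem_nil)
    | some m =>
      congr 1
      have hm1 : m ≤ v2 := PySem.List.min?_isMin h v2 hv2F
      have hm_mem := PySem.List.min?_mem h
      obtain ⟨hm_sorted, hm_gt⟩ := List.mem_filter.mp hm_mem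
      have hm_gt' : pivot < m := by simpa using hm_gt
      have hm_suf : m ∈ suf := (PySem.List.mem_sorted _ _ _ _).mp hm_sorted
      have hm2 : v2 ≤ m := by
        rcases List.mem_append.mp (htr ▸ hm_suf) with hmt | hmr
        · exact pv_getLast_le ht_pair hmt htne
        · exact absurd (hr_le m hmr) (not_le.mpr hm_gt')
      exact le_antisymm hm1 hm2
  have hremove : PySem.List.remove? (PySem.List.sorted suf (fun x => x) false) v2 =
      some ((PySem.List.sorted suf (fun x => x) false).erase v2) :=
    PySem.List.remove?_eq_some_erase _ v2 hv2tail
  have hAeval : pvAOut ds =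
      (if (PySem.Int.ofStr? ((ds.take (K - 1) ++ [v2] ++ ys).foldl
          (fun s d => s ++ PySem.Int.toStr d) "")).getD 0 < 2 ^ 31 then
        (PySem.Int.ofStr? ((ds.take (K - 1) ++ [v2] ++ ys).foldl
          (fun s d => s ++ PySem.Int.toStr d) "")).getD 0 else -1) := by
    rw [pvAOut]
    simp only [← hLdef]
    rw [hpivA, if_neg (by omega)]
    simp only [Int.toNat_natCast, PySem.List.pyGetD_natCast]
    rw [← hpivotdef, hsecA, hv2idx, hAlist]
  have hBeval : pvBOut ds =
      (if (PySem.Int.ofStr? ((ds.take (K - 1) ++ [v2] ++ ys).foldl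
          (fun s d => s ++ PySem.Int.toStr d) "")).getD 0 < 2 ^ 31 then
        (PySem.Int.ofStr? ((ds.take (K - 1) ++ [v2] ++ ys).foldl
          (fun s d => s ++ PySem.Int.toStr d) "")).getD 0 else -1) := by
    rw [pvBOut]
    simp only
    rw [if_neg hr]
    rw [PySem.List.pyGetD_neg_one (pvRises ds) 0 hr, ← hkBdef, hkBK]
    rw [show (K : Int) - 1 = ((K - 1 : Nat) : Int) by omega]
    rw [PySem.List.pyGetD_natCast, ← hpivotdef]
    rw [PySem.List.slice_from_natCast, ← hsufdef]
    rw [PySem.List.slice_to_natCast]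
    rw [hminv2]
    simp only [Option.getD_some]
    rw [hremove]
    simp only [Option.getD_some]
    rw [hsorted_ys]
    rw [pv_join_eq_foldl]
  rw [hAeval, hBeval]

theorem pv_main (ds : List Int) : pvAOut ds = pvBOut ds := by
  by_cases hr : pvRises ds = []
  · exact pv_main_none ds hr
  · exact pv_main_some ds hr

-- ===== VERDICT (by name: the statement is the Claim_ definition above) =====
theorem next_greater_element_3_spec : Claim_equal_next_greater_element_3 := by
  intro n _ _
  show next_greater_element_3 n = next_greater_element_3_alt n
  rw [pvA_eq, pvB_eq, pv_main]
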